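-- pv_equiv track=rewrite | github.com/biodatageeks/genomic-publications-agent | scripts/fix_json.py | fix_inconsistent_quotes
-- ===== SOURCE A (Python) =====
-- def fix_inconsistent_quotes(json_str: str) -> str:
--     """
--     Naprawia niekonsekwentne cudzysłowy (miesza ' i ").
--
--     Args:
--         json_str: Ciąg JSON do naprawy
--
--     Returns:
--         Naprawiony ciąg JSON
--     """
--     # Zamień wszystkie pojedyncze cudzysłowy na podwójne
--     in_string = False
--     result = []
--
--     i = 0
--     while i < len(json_str):
--         char = json_str[i]
--
--         if char == '"':
--             # Rozpocznij lub zakończ ciąg znaków z podwójnymi cudzysłowami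
--             in_string = not in_string
--             result.append(char)
--         elif char == "'" and not in_string:
--             # Zamień pojedyncze cudzysłowy na podwójne poza ciągami znaków
--             result.append('"')
--         else:
--             result.append(char)
--
--         i += 1
--
--     return ''.join(result)
-- ===== SOURCE B (Python) =====
-- def fix_inconsistent_quotes(json_str: str) -> str:
--     segments = json_str.split('"')
--     fixed = [seg.replace("'", '"') if i % 2 == 0 else seg
--              for i, seg in enumerate(segments)]
--     return '"'.join(fixed)
-- ===== Notes on version B (the rewrite author's own statement) =====
-- stated objective: simpler
-- what changed: Replaces the explicit index/while loop with an in_string flag by a pipeline that splits on the double-quote character, rewrites single quotes only in even-indexed (outside-string) segments, and rejoins.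
import Mathlib
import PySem

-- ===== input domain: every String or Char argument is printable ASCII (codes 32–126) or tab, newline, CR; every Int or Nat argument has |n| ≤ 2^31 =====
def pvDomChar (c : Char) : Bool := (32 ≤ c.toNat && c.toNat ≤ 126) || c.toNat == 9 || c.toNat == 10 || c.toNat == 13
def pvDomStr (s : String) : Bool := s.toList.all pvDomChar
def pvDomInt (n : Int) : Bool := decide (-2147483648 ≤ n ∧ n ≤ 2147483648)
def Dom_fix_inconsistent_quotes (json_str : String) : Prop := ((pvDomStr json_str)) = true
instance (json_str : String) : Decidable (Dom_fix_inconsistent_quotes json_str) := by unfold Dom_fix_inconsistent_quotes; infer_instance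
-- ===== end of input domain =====

-- B replaces A's explicit index/while loop with an in_string flag by a
-- split-on-'"' / replace-in-even-segments / rejoin pipeline (same O(n) cost, simpler).

-- ===== PORT A =====
-- the while loop over indices with the in_string flag, consing each appended char
def fixLoopA : Bool → List Char → List Char
  | _, [] => []
  | inS, c :: cs =>
    if c = '"' then '"' :: fixLoopA (!inS) cs
    else if c = '\'' ∧ inS = false then '"' :: fixLoopA inS cs
    else c :: fixLoopA inS cs

def fix_inconsistent_quotes (json_str : String) : String :=
  String.ofList (fixLoopA false json_str.toList)

-- ===== PORT B =====
def fix_inconsistent_quotes_alt (json_str : String) : String :=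
  let segments := PySem.Chars.splitOn json_str.toList ['"']
  let fixed := (PySem.List.enumerate segments).map
    (fun p => if p.1 % 2 == 0 then PySem.Chars.replace p.2 ['\''] ['"'] else p.2)
  String.ofList (PySem.Chars.join ['"'] fixed)

-- ===== PRECONDITION & SPEC =====
def Spec_fix_inconsistent_quotes (json_str : String) (out : String) : Prop := out = fix_inconsistent_quotes_alt json_str
instance (json_str : String) (out : String) : Decidable (Spec_fix_inconsistent_quotes json_str out) := by unfold Spec_fix_inconsistent_quotes; infer_instance

-- ===== CLAIM (what is proved, stated in full; the proofs are below) =====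
def Claim_equal_fix_inconsistent_quotes : Prop := ∀ (json_str : String), Dom_fix_inconsistent_quotes json_str → Spec_fix_inconsistent_quotes json_str (fix_inconsistent_quotes json_str)

-- ===== LEMMAS AND PROOFS =====

-- replacing every ' by " in a segment
def repQ (l : List Char) : List Char := l.map (fun c => if c = '\'' then '"' else c)

-- the simple split-on-'"' (proof-side characterisation of PySem.Chars.splitOn · ['"'])
def splitq : List Char → List (List Char)
  | [] => [[]]
  | c :: cs => if c = '"' then [] :: splitq cs else (c :: (splitq cs).headI) :: (splitq cs).tail

lemma splitq_ne_nil (l : List Char) : splitq l ≠ [] := by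
  cases l with
  | nil => simp [splitq]
  | cons c cs => simp only [splitq]; split <;> simp

lemma splitq_cons_head_tail (l : List Char) :
    splitq l = (splitq l).headI :: (splitq l).tail := by
  cases h : splitq l with
  | nil => exact absurd h (splitq_ne_nil l)
  | cons a t => simp

lemma replace_go_eq (l : List Char) : ∀ (fuel : Nat) (acc : List Char), l.length ≤ fuel →
    PySem.Chars.replace.go ['\''] ['"'] fuel l acc = acc.reverse ++ repQ l := by
  induction l with
  | nil =>
    intro fuel acc _
    cases fuel <;> simp [PySem.Chars.replace.go, repQ]
  | cons c cs ih =>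
    intro fuel acc h
    cases fuel with
    | zero => simp at h
    | succ n =>
      simp only [PySem.Chars.replace.go]
      by_cases hc : c = '\''
      · subst hc
        rw [if_pos (by simp [List.isPrefixOf])]
        rw [show List.drop (List.length ['\'']) ('\'' :: cs) = cs from by simp]
        rw [ih n _ (by simpa using h)]
        simp [repQ]
      · have hc' : ('\'' : Char) ≠ c := fun e => hc e.symm
        rw [if_neg (by simp [List.isPrefixOf, hc'])]
        rw [ih n _ (by simpa using h)]
        simp [repQ, hc]

lemma replace_eq_repQ (l : List Char) :
    PySem.Chars.replace l ['\''] ['"'] = repQ l := by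
  simp only [PySem.Chars.replace, List.isEmpty_cons]
  simpa using replace_go_eq l l.length [] le_rfl

lemma splitOn_go_eq (l : List Char) : ∀ (fuel : Nat) (cur : List Char) (acc : List (List Char)),
    l.length < fuel →
    PySem.Chars.splitOn.go ['"'] fuel l cur acc
      = acc.reverse ++ (cur.reverse ++ (splitq l).headI) :: (splitq l).tail := by
  induction l with
  | nil =>
    intro fuel cur acc h
    cases fuel with
    | zero => simp at h
    | succ n => simp [PySem.Chars.splitOn.go, splitq]
  | cons c cs ih =>
    intro fuel cur acc h
    cases fuel with
    | zero => simp at h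
    | succ n =>
      simp only [PySem.Chars.splitOn.go]
      by_cases hc : c = '"'
      · subst hc
        rw [if_pos (by simp [List.isPrefixOf])]
        rw [show List.drop (List.length ['"']) ('"' :: cs) = cs by simp]
        rw [ih n [] _ (by simpa using h)]
        simp only [splitq]
        simp only [List.reverse_cons, List.reverse_nil, List.nil_append, List.append_assoc]
        simp [← splitq_cons_head_tail]
      · have hc' : ('"' : Char) ≠ c := fun e => hc e.symm
        rw [if_neg (by simp [List.isPrefixOf, hc'])]
        rw [ih n (c :: cur) acc (by simpa using h)]
        simp [splitq, hc]

lemma splitOn_eq_splitq (l : List Char) :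
    PySem.Chars.splitOn l ['"'] = splitq l := by
  rw [show PySem.Chars.splitOn l ['"']
        = PySem.Chars.splitOn.go ['"'] (l.length + 1) l [] [] from rfl]
  rw [splitOn_go_eq l (l.length + 1) [] [] (by omega)]
  simpa using (splitq_cons_head_tail l).symm

-- alternate processing: even positions get repQ, segments rejoined with '"'
def procAlt : Bool → List (List Char) → List Char
  | _, [] => []
  | ev, [s] => if ev then repQ s else s
  | ev, s :: t :: rest => (if ev then repQ s else s) ++ '"' :: procAlt (!ev) (t :: rest)

lemma loopA_eq_procAlt (l : List Char) : ∀ (b : Bool),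
    fixLoopA b l = procAlt (!b) (splitq l) := by
  induction l with
  | nil => intro b; cases b <;> simp [fixLoopA, splitq, procAlt, repQ]
  | cons c cs ih =>
    intro b
    by_cases hc : c = '"'
    · subst hc
      simp only [fixLoopA, splitq]
      rw [splitq_cons_head_tail cs]
      cases b <;> simp [procAlt, ih, repQ] <;>
        exact congrArg _ (splitq_cons_head_tail cs)
    · have hsplit : splitq (c :: cs) = (c :: (splitq cs).headI) :: (splitq cs).tail := by
        simp [splitq, hc]
      have key : ∀ ev, procAlt ev ((c :: (splitq cs).headI) :: (splitq cs).tail)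
          = (if ev then (if c = '\'' then '"' else c) else c) :: procAlt ev (splitq cs) := by
        intro ev
        rw [splitq_cons_head_tail cs]
        cases h : (splitq cs).tail with
        | nil => cases ev <;> simp [procAlt, repQ]
        | cons t rest => cases ev <;> simp [procAlt, repQ]
      rw [hsplit, key]
      cases b with
      | false =>
        by_cases hq : c = '\''
        · subst hq; simp [fixLoopA, ih]
        · simp [fixLoopA, hc, hq, ih]
      | true => simp [fixLoopA, hc, ih]

lemma intercalate_map_enumerate (segs : List (List Char)) : ∀ (k : Int), 0 ≤ k →
    PySem.Chars.join ['"'] ((PySem.List.enumerate segs k).map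
        (fun p => if p.1 % 2 == 0 then PySem.Chars.replace p.2 ['\''] ['"'] else p.2))
      = procAlt (decide (k % 2 = 0)) segs := by
  induction segs with
  | nil => intro k _; simp [PySem.Chars.join, PySem.List.enumerate_nil, procAlt, List.intercalate]
  | cons s rest ih =>
    intro k hk
    rw [PySem.List.enumerate_cons]
    cases rest with
    | nil =>
      simp only [PySem.List.enumerate_nil, List.map_cons, List.map_nil]
      by_cases h : k % 2 = 0 <;>
        simp [PySem.Chars.join, List.intercalate, procAlt, h, replace_eq_repQ]
    | cons t rest' =>
      have hjoin : ∀ (x y : List Char) (zs : List (List Char)),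
          PySem.Chars.join ['"'] (x :: y :: zs) = x ++ '"' :: PySem.Chars.join ['"'] (y :: zs) := by
        intro x y zs
        simp [PySem.Chars.join, List.intercalate, List.intersperse]
      have ih' := ih (k + 1) (by omega)
      rw [PySem.List.enumerate_cons, List.map_cons] at ih'
      simp only [List.map_cons]
      rw [PySem.List.enumerate_cons, List.map_cons, hjoin, ih']
      by_cases h : k % 2 = 0
      · have h1 : ¬ ((k + 1) % 2 = 0) := by omega
        simp [procAlt, h, h1, replace_eq_repQ]
      · have h1 : (k + 1) % 2 = 0 := by omega
        simp [procAlt, h, h1]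

-- ===== VERDICT (by name: the statement is the Claim_ definition above) =====
theorem fix_inconsistent_quotes_spec : Claim_equal_fix_inconsistent_quotes := by
  intro json_str _
  show _ = _
  unfold fix_inconsistent_quotes fix_inconsistent_quotes_alt
  simp only [splitOn_eq_splitq]
  rw [intercalate_map_enumerate (splitq json_str.toList) 0 (by norm_num)]
  rw [loopA_eq_procAlt json_str.toList false]
  norm_num
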